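/- GENERATED by farm/mkstatement.py from design/units.tsv (unit `DGifCloseFile.COMPOSITION`) and the Specs of Gif/Spec/*.lean — do not edit.
   THE STATEMENT of the proof unit `DGifCloseFile.COMPOSITION`: the function `DGifCloseFile` (92 instructions) satisfies its contract,
   GIVEN THE STATEMENTS OF ITS 5 SEGMENTS (`Gif.Spec.DGifCloseFile.Seg<k> Lay μ u₀`: what the unit `DGifCloseFile.<k>` proves).
   No machine code is walked: `ReachVia.trans` along the segments (the exit assertion of a segment is the entry assertion of
   its successor), an induction on the loop measures. What the names mean: ProgX/Base/Spec/Basic.lean. The theorem to prove: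
   `theorem DGifCloseFile_COMPOSITION_ok : Gif.Spec.DGifCloseFile_COMPOSITION.Statement`. -/
import Gif.Code
import Gif.Dec.All
import Gif.Labels
import Gif.Spec.Seg_DGifCloseFile
import Gif.Spec.Slurp
namespace Gif.Spec.DGifCloseFile_COMPOSITION
open X86 X86.User Asan

/-- The statement of unit `DGifCloseFile.COMPOSITION`. -/
def Statement : Prop :=
  ∀ (Lay : Layout) (_hLay : Lay.hi = 0x1000000) (μ : Microarch) (_hμ : UserX.MicroOK μ) (u₀ : State)
    (_h_DGifCloseFile_1 : Gif.Spec.DGifCloseFile.Seg1 Lay μ u₀)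
    (_h_DGifCloseFile_2 : Gif.Spec.DGifCloseFile.Seg2 Lay μ u₀)
    (_h_DGifCloseFile_3 : Gif.Spec.DGifCloseFile.Seg3 Lay μ u₀)
    (_h_DGifCloseFile_4 : Gif.Spec.DGifCloseFile.Seg4 Lay μ u₀)
    (_h_DGifCloseFile_5 : Gif.Spec.DGifCloseFile.Seg5 Lay μ u₀),
    ∀ (H : Heap) (rest : List Obj) (frames : List (Nat × FrameLayout)) (F : Forest) (R : Rd), Calls Lay μ ProgX.Base.WayInv (ProgX.Base.conv u₀) Gif.L.DGifCloseFile.entry (Gif.Spec.DGifCloseFile.spec H rest frames F R)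

end Gif.Spec.DGifCloseFile_COMPOSITION
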